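-- pv_equiv track=rewrite | github.com/Tasnimul-Arabi-Anik/phage-pangenome-pipeline | workflow/scripts/infer_orthogroups.py | summarize_product
-- ===== SOURCE A (Python) =====
-- from collections import Counter, defaultdict
--
-- def summarize_product(values):
--     cleaned = [value for value in values if value]
--     informative = [value for value in cleaned if "hypothetical" not in value.lower()]
--     if informative:
--         return Counter(informative).most_common(1)[0][0]
--     if cleaned:
--         return Counter(cleaned).most_common(1)[0][0]
--     return "hypothetical protein"
-- ===== SOURCE B (Python) =====
-- def summarize_product(values):
--     cleaned = [value for value in values if value]
--     informative = [value for value in cleaned if "hypothetical" not in value.lower()]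
--
--     def pick(items):
--         # Successive elimination instead of a frequency table: repeatedly take
--         # the first remaining value, count it, strip all of its occurrences,
--         # and keep the strictly more frequent champion (earlier wins ties).
--         best = None
--         best_count = 0
--         while items:
--             head = items[0]
--             count = items.count(head)
--             items = [value for value in items if value != head]
--             if count > best_count:
--                 best, best_count = head, count
--         return best
--
--     winner = pick(informative) or pick(cleaned)
--     return winner or "hypothetical protein"
-- ===== Notes on version B (the rewrite author's own statement) =====
-- stated objective: alternative
-- what changed: Replaces Counter(...).most_common(1) with a table-free successive-elimination loop: while items remain, take the first value, count it with list.count, strip all its occurrences with a filter pass, and keep the strictly more frequent champion (earlier value wins ties), falling back informative -> cleaned -> 'hypothetical protein'.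
import Mathlib
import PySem

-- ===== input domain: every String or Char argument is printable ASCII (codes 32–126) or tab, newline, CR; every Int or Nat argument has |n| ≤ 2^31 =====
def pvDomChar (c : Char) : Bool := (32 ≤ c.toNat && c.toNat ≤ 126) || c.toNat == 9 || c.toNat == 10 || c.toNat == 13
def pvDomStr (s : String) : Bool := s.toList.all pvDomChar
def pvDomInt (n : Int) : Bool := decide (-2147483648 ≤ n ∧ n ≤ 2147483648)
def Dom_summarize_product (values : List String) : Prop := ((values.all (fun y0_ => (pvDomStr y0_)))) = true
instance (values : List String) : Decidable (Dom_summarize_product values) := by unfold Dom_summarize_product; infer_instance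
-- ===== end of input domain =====

-- B replaces Counter(...).most_common(1) by a table-free successive-elimination loop
-- (count the first remaining value, strip its occurrences, keep the strictly more frequent champion).


-- ===== PORT A =====
-- Counter(xs).most_common(1)[0][0]: heapq.nlargest(1, …) returns the first item with the
-- maximal count (stable on the counter's insertion order), i.e. PySem.List.max? over the
-- counter's items; the `none` arm is unreachable (A only calls it on a nonempty list).
def pyMostCommon1 (xs : List String) : String :=
  match PySem.List.max? (PySem.Dict.counter xs).items (fun kv => kv.2) with
  | some kv => kv.1
  | none => ""

def summarize_product (values : List String) : String :=
  let cleaned := values.filter (fun value => value ≠ "")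
  let informative := cleaned.filter
    (fun value => !(PySem.Str.isIn "hypothetical" (PySem.Str.lower value)))
  if informative ≠ [] then pyMostCommon1 informative
  else if cleaned ≠ [] then pyMostCommon1 cleaned
  else "hypothetical protein"

-- ===== PORT B =====
-- Source B's `pick` while-loop: state (best, best_count); each turn counts the first
-- remaining value, strips all its occurrences, and updates the champion on strict >.
def pvPickGo : List String → Option String → Int → Option String
  | [], best, _ => best
  | head :: t, best, bestCount =>
    let c : Int := (PySem.List.count (head :: t) head : Int)
    let rest := (head :: t).filter (fun value => value ≠ head)
    if bestCount < c then pvPickGo rest (some head) c else pvPickGo rest best bestCount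
termination_by items _ _ => items.length
decreasing_by
  all_goals
    simp only [List.filter_cons, decide_not, ne_eq]
    exact Nat.lt_succ_of_le (List.length_filter_le _ _)

def pvPick (items : List String) : Option String := pvPickGo items none 0

def summarize_product_alt (values : List String) : String :=
  let cleaned := values.filter (fun value => value ≠ "")
  let informative := cleaned.filter
    (fun value => !(PySem.Str.isIn "hypothetical" (PySem.Str.lower value)))
  match pvPick informative with
  | some w => w
  | none =>
    match pvPick cleaned with
    | some w => w
    | none => "hypothetical protein"

-- ===== PRECONDITION & SPEC =====
def Spec_summarize_product (values : List String) (out : String) : Prop := out = summarize_product_alt values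
instance (values : List String) (out : String) : Decidable (Spec_summarize_product values out) := by unfold Spec_summarize_product; infer_instance

-- ===== CLAIM (what is proved, stated in full; the proofs are below) =====
def Claim_equal_summarize_product : Prop := ∀ (values : List String), Dom_summarize_product values → Spec_summarize_product values (summarize_product values)

-- ===== LEMMAS AND PROOFS =====

-- max? as a cons-recursion: foldl with a running `some` champion
lemma max?_foldl_some {α : Type} (key : α → Int) (l : List α) : ∀ (x : α),
    List.foldl
      (fun acc y =>
        match acc with
        | none => some y
        | some m => if key m < key y then some y else some m)
      (some x) l
    = some (match PySem.List.max? l key with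
        | none => x
        | some b => if key x < key b then b else x) := by
  induction l with
  | nil => intro x; rfl
  | cons y t ih =>
    intro x
    have hmax : PySem.List.max? (y :: t) key
        = List.foldl
            (fun acc z =>
              match acc with
              | none => some z
              | some m => if key m < key z then some z else some m)
            (some y) t := rfl
    simp only [List.foldl_cons]
    by_cases hxy : key x < key y
    · rw [if_pos hxy, ih y, hmax, ih y]
      cases hmt : PySem.List.max? t key with
      | none => simp [hxy]
      | some b =>
        by_cases hyb : key y < key b
        · have hxb : key x < key b := lt_trans hxy hyb
          simp [hyb, hxb]
        · simp [hyb, hxy]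
    · rw [if_neg hxy, ih x, hmax, ih y]
      cases hmt : PySem.List.max? t key with
      | none => simp [hxy]
      | some b =>
        by_cases hyb : key y < key b
        · simp [hyb]
        · have hbx : ¬ key x < key b := by
            intro h; exact hxy (lt_of_lt_of_le h (le_of_not_gt hyb))
          simp [hyb, hxy, hbx]

lemma max?_cons {α : Type} (key : α → Int) (x : α) (l : List α) :
    PySem.List.max? (x :: l) key
      = some (match PySem.List.max? l key with
          | none => x
          | some b => if key x < key b then b else x) := by
  show List.foldl _ (some x) l = _
  exact max?_foldl_some key l x

-- Set.ofList splits at the head: first occurrence kept, later copies dropped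
lemma foldl_add_contains (x : String) :
    ∀ (t : List String) (s : PySem.Set String), PySem.Set.contains s x = true →
      t.foldl PySem.Set.add s = (t.filter (fun y => y ≠ x)).foldl PySem.Set.add s := by
  intro t
  induction t with
  | nil => intro s _; rfl
  | cons y t ih =>
    intro s hs
    by_cases hyx : y = x
    · subst hyx
      have hadd : PySem.Set.add s y = s := by unfold PySem.Set.add; rw [if_pos hs]
      simp only [List.foldl_cons, List.filter_cons, hadd]
      rw [if_neg (by simp)]
      exact ih s hs
    · simp only [List.foldl_cons, List.filter_cons]
      rw [if_pos (by simp [hyx])]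
      simp only [List.foldl_cons]
      refine ih _ ?_
      unfold PySem.Set.add
      by_cases hc : PySem.Set.contains s y = true
      · rw [if_pos hc]; exact hs
      · rw [if_neg hc]
        simp [PySem.Set.contains] at hs ⊢
        exact Or.inl hs

lemma foldl_add_cons_shift (x : String) :
    ∀ (l : List String) (s : List String), (∀ y ∈ l, y ≠ x) →
      l.foldl PySem.Set.add (x :: s) = x :: l.foldl PySem.Set.add s := by
  intro l
  induction l with
  | nil => intro s _; rfl
  | cons y t ih =>
    intro s hl
    have hyx : y ≠ x := hl y (by simp)
    have hadd : PySem.Set.add (x :: s) y = x :: PySem.Set.add s y := by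
      unfold PySem.Set.add
      have hcc : PySem.Set.contains (x :: s) y = PySem.Set.contains s y := by
        simp [PySem.Set.contains]
        intro h; exact absurd h hyx
      rw [hcc]
      by_cases hc : PySem.Set.contains s y = true
      · rw [if_pos hc, if_pos hc]
      · rw [if_neg hc, if_neg hc]; rfl
    simp only [List.foldl_cons, hadd]
    exact ih _ (fun z hz => hl z (by simp [hz]))

lemma ofList_cons (x : String) (t : List String) :
    PySem.Set.ofList (x :: t) = x :: PySem.Set.ofList (t.filter (fun y => y ≠ x)) := by
  have h0 : PySem.Set.ofList (x :: t) = t.foldl PySem.Set.add [x] := rfl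
  rw [h0, foldl_add_contains x t [x] (by simp [PySem.Set.contains])]
  rw [foldl_add_cons_shift x _ [] (by
    intro y hy
    have := List.of_mem_filter hy
    simpa using this)]
  rfl

-- counter's items split at the head value
lemma counter_items_cons (x : String) (t : List String) :
    (PySem.Dict.counter (x :: t)).items
      = (x, ((x :: t).count x : Int)) ::
        (PySem.Dict.counter (t.filter (fun y => y ≠ x))).items := by
  rw [PySem.Dict.items_counter, PySem.Dict.items_counter, ofList_cons]
  simp only [List.map_cons, List.cons.injEq]
  refine ⟨trivial, ?_⟩
  apply List.map_congr_left
  intro k hk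
  have hkmem : k ∈ t.filter (fun y => y ≠ x) := (PySem.Set.mem_ofList _ _).1 hk
  have hkx : k ≠ x := by simpa using List.of_mem_filter hkmem
  have hcount : (x :: t).count k = (t.filter (fun y => y ≠ x)).count k := by
    rw [List.count_cons]
    have : (x == k) = false := by
      simp only [beq_eq_false_iff_ne]; exact fun h => hkx h.symm
    rw [this]
    simp only [Bool.false_eq_true, if_false, Nat.add_zero]
    rw [List.count_filter (by simpa using hkx)]
  simp [hcount]

-- every count in a counter's items is positive
lemma counter_items_pos (xs : List String) :
    ∀ kv ∈ (PySem.Dict.counter xs).items, 0 < kv.2 := by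
  intro kv hkv
  rw [PySem.Dict.items_counter] at hkv
  simp only [List.mem_map] at hkv
  obtain ⟨k, hk, rfl⟩ := hkv
  have : k ∈ xs := (PySem.Set.mem_ofList _ _).1 hk
  simpa using List.count_pos_iff.2 this

-- the elimination loop computes exactly the first maximal-count item of the counter
lemma pvPickGo_spec : ∀ (n : ℕ) (l : List String), l.length ≤ n → ∀ (b : Option String) (c : Int),
    pvPickGo l b c
      = match PySem.List.max? (PySem.Dict.counter l).items (fun kv => kv.2) with
        | none => b
        | some kv => if c < kv.2 then some kv.1 else b := by
  intro n
  induction n with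
  | zero =>
    intro l hl b c
    have : l = [] := List.eq_nil_of_length_eq_zero (Nat.le_zero.1 hl)
    subst this
    rw [pvPickGo]
    rfl
  | succ n ih =>
    intro l hl b c
    cases l with
    | nil => rw [pvPickGo]; rfl
    | cons head t =>
      rw [pvPickGo]
      have hrest : ((head :: t).filter (fun value => value ≠ head))
          = t.filter (fun y => y ≠ head) := by simp
      have hlen : (t.filter (fun y => y ≠ head)).length ≤ n :=
        le_trans (List.length_filter_le _ _) (Nat.succ_le_succ_iff.1 hl)
      rw [counter_items_cons, max?_cons]
      simp only [hrest, PySem.List.count_eq]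
      by_cases hc : c < ((head :: t).count head : Int)
      · rw [if_pos hc, ih _ hlen]
        cases hmt : PySem.List.max?
            (PySem.Dict.counter (t.filter (fun y => y ≠ head))).items
            (fun kv => kv.2) with
        | none => simp only []; rw [if_pos hc]
        | some kv =>
          simp only []
          by_cases hk : ((((head :: t).count head : ℕ) : Int) < kv.2)
          · rw [if_pos hk, if_pos hk, if_pos (lt_trans hc hk)]
          · rw [if_neg hk, if_neg hk, if_pos hc]
      · rw [if_neg hc, ih _ hlen]
        cases hmt : PySem.List.max?
            (PySem.Dict.counter (t.filter (fun y => y ≠ head))).items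
            (fun kv => kv.2) with
        | none => simp only []; rw [if_neg hc]
        | some kv =>
          simp only []
          by_cases hk : ((((head :: t).count head : ℕ) : Int) < kv.2)
          · rw [if_pos hk]
          · rw [if_neg hk, if_neg hc,
              if_neg (fun h : c < kv.2 => hc (lt_of_lt_of_le h (le_of_not_gt hk)))]

lemma counter_items_ne_nil (xs : List String) (h : xs ≠ []) :
    (PySem.Dict.counter xs).items ≠ [] := by
  rw [PySem.Dict.items_counter]
  cases xs with
  | nil => exact absurd rfl h
  | cons x t =>
    have hx : x ∈ PySem.Set.ofList (x :: t) := (PySem.Set.mem_ofList _ _).2 (by simp)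
    intro hc
    rw [List.map_eq_nil_iff] at hc
    rw [hc] at hx
    exact absurd hx (List.not_mem_nil)

-- B's pick equals A's most_common on nonempty lists, and none on []
lemma pvPick_spec (l : List String) (h : l ≠ []) :
    pvPick l = some (pyMostCommon1 l) := by
  unfold pvPick pyMostCommon1
  rw [pvPickGo_spec l.length l (le_refl _)]
  cases hm : PySem.List.max? (PySem.Dict.counter l).items (fun kv => kv.2) with
  | none =>
    exact absurd ((PySem.List.max?_eq_none_iff _ _).1 hm) (counter_items_ne_nil l h)
  | some kv =>
    have hmem := PySem.List.max?_mem hm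
    have hpos := counter_items_pos l kv hmem
    show (if (0:Int) < kv.2 then some kv.1 else none) = some kv.1
    rw [if_pos hpos]

lemma pvPick_nil : pvPick ([] : List String) = none := by rw [pvPick, pvPickGo]

-- ===== VERDICT (by name: the statement is the Claim_ definition above) =====
theorem summarize_product_spec : Claim_equal_summarize_product := by
  intro values _
  unfold Spec_summarize_product
  simp only [summarize_product, summarize_product_alt]
  set cleaned := values.filter (fun value => value ≠ "") with hcl
  set informative := cleaned.filter
    (fun value => !(PySem.Str.isIn "hypothetical" (PySem.Str.lower value))) with hinf
  by_cases h1 : informative = []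
  · rw [h1]
    simp only [pvPick_nil]
    by_cases h2 : cleaned = []
    · rw [h2]; simp [pvPick_nil]
    · rw [if_neg (fun h => h rfl), if_pos h2, pvPick_spec cleaned h2]
  · rw [if_pos h1, pvPick_spec informative h1]
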